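-- pv_equiv track=rewrite | github.com/5h4hid5/py-basics | 004_function.py | rightJustify
-- ===== SOURCE A (Python) =====
-- def rightJustify(s):
--     l = len(s)
--     res = ''
--     while l < 70:
--         res = res + ' '
--         l = l + 1
--     res = res + s
--     return res
-- ===== SOURCE B (Python) =====
-- def rightJustify(s):
--     return ' ' * (70 - len(s)) + s
-- ===== Notes on version B (the rewrite author's own statement) =====
-- stated objective: simpler
-- what changed: Replaces the character-by-character while-loop accumulation with a single closed-form expression: compute the pad count from the length and prepend that many spaces at once.
import Mathlib
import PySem

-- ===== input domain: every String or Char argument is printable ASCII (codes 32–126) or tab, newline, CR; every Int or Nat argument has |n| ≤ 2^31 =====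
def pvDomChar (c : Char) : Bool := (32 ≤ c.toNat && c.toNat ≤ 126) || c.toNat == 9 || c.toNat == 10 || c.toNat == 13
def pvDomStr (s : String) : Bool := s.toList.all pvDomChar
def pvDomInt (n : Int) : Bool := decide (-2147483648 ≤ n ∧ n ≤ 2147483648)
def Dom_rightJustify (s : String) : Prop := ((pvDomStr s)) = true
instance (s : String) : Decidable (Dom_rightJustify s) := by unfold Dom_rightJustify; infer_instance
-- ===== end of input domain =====

-- B replaces A's one-space-at-a-time accumulation loop with a closed-form
-- pad count (simpler); both return s unchanged when len(s) ≥ 70.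

-- ===== PORT A =====
-- the while-loop: res = res + ' '; l = l + 1 while l < 70
def rjLoopA (l : Nat) (res : List Char) : List Char :=
  if l < 70 then rjLoopA (l + 1) (res ++ [' ']) else res
termination_by 70 - l

def rightJustify (s : String) : String :=
  String.ofList (rjLoopA s.toList.length [] ++ s.toList)

-- ===== PORT B =====
def rightJustify_alt (s : String) : String :=
  String.ofList (List.replicate (70 - s.toList.length) ' ' ++ s.toList)

-- ===== PRECONDITION & SPEC =====
def Spec_rightJustify (s : String) (out : String) : Prop := out = rightJustify_alt s
instance (s : String) (out : String) : Decidable (Spec_rightJustify s out) := by unfold Spec_rightJustify; infer_instance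

-- ===== CLAIM (what is proved, stated in full; the proofs are below) =====
def Claim_equal_rightJustify : Prop := ∀ (s : String), Dom_rightJustify s → Spec_rightJustify s (rightJustify s)

-- ===== LEMMAS AND PROOFS =====
theorem rjLoopA_eq (l : Nat) (res : List Char) :
    rjLoopA l res = res ++ List.replicate (70 - l) ' ' := by
  induction l, res using rjLoopA.induct with
  | case1 l res h ih =>
    rw [rjLoopA, if_pos h, ih, List.append_assoc]
    congr 1
    have : 70 - l = (70 - (l + 1)) + 1 := by omega
    rw [this, List.replicate_succ]
    rfl
  | case2 l res h =>
    rw [rjLoopA, if_neg h]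
    have : 70 - l = 0 := by omega
    simp [this]

-- ===== VERDICT (by name: the statement is the Claim_ definition above) =====
theorem rightJustify_spec : Claim_equal_rightJustify := by
  intro s _
  unfold Spec_rightJustify rightJustify rightJustify_alt
  rw [rjLoopA_eq]
  simp
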